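-- pv_equiv track=rewrite | github.com/forTEXT/Journal_Pipeline | submission/tests/test_seitenzahlen/insert_table.py | insert_table_before_third_heading
-- ===== SOURCE A (Python) =====
-- def insert_table_before_third_heading(lines, table_markdown):
--     headings = [i for i, line in enumerate(lines) if line.startswith('# ')]
--
--     if len(headings) < 3:
--         raise ValueError("Es gibt weniger als drei Level-1-Überschriften.")
--
--     third_heading_index = headings[2]
--
--     new_lines = lines[:third_heading_index]
--
--     # Neue Zeilen für LaTeX-Befehle hinzufügen
--     new_lines.append('```{=latex}\n')
--     new_lines.append('\\begin{landscape}\n')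
--     new_lines.append('```\n')
--     new_lines.append('\n')
--
--     # Tabelle hinzufügen
--     new_lines.append(table_markdown)
--
--     # LaTeX-Befehl für Querformat beenden
--     new_lines.append('\n\n')
--     new_lines.append('```{=latex}\n')
--     new_lines.append('\\end{landscape}\n')
--     new_lines.append('```\n')
--     new_lines.append('\n')
--
--     # Rest des Dokuments wiederherstellen
--     new_lines.extend(lines[third_heading_index:])
--
--     return new_lines
-- ===== SOURCE B (Python) =====
-- def insert_table_before_third_heading(lines, table_markdown):
--     # Streaming rebuild: emit lines into a fresh output list while counting down
--     # remaining headings; the block is emitted inline just before the line that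
--     # exhausts the countdown. No heading index is ever computed and no slicing
--     # or list splicing is done.
--     out = []
--     remaining = 3
--     for line in lines:
--         if remaining and line.startswith('# '):
--             remaining -= 1
--             if remaining == 0:
--                 out.extend(['```{=latex}\n', '\\begin{landscape}\n', '```\n', '\n',
--                             table_markdown, '\n\n', '```{=latex}\n',
--                             '\\end{landscape}\n', '```\n', '\n'])
--         out.append(line)
--     if remaining:
--         raise ValueError("Es gibt weniger als drei Level-1-Überschriften.")
--     return out
-- ===== Notes on version B (the rewrite author's own statement) =====
-- stated objective: alternative
-- what changed: B never computes a heading index or slices the list: it rebuilds the output in one streaming pass, copying each line into a fresh list while counting down a remaining-headings counter and emitting the LaTeX block inline just before the line that exhausts the countdown; A collects all heading indices, picks [2] and splices lines[:i]+block+lines[i:].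
import Mathlib
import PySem

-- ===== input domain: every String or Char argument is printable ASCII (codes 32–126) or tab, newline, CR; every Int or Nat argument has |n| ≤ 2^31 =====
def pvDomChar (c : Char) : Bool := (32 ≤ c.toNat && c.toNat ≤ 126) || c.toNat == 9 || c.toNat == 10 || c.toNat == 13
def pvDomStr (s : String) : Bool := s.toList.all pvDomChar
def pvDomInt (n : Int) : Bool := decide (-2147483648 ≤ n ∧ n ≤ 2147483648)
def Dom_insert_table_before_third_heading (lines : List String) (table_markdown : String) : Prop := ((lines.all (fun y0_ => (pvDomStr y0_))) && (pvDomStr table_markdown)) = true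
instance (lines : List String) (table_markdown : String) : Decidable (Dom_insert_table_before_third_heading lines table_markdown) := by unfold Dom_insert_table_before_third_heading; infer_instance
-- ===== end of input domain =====

-- B rebuilds the output in one streaming pass with a remaining-headings countdown (no
-- heading index, no slicing); A collects all heading indices, picks [2] and splices.
-- Same return value wherever A returns (Pre_); not claimed faster.


-- ===== PORT A =====
-- headings = [i for i, line in enumerate(lines) if line.startswith('# ')]
def pvHeadingsA (lines : List String) : List Int :=
  (PySem.List.enumerate lines 0).filterMap
    (fun p => if PySem.Str.startswith p.2 "# " then some p.1 else none)

def insert_table_before_third_heading (lines : List String) (table_markdown : String) : List String :=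
  let headings := pvHeadingsA lines
  match headings[2]? with
  | none => []  -- raise ValueError("Es gibt weniger als drei Level-1-Überschriften.") — excluded by Pre_
  | some third_heading_index =>
    let new_lines := PySem.List.slice lines none (some third_heading_index)
    let new_lines := new_lines.concat "```{=latex}\n"
    let new_lines := new_lines.concat "\\begin{landscape}\n"
    let new_lines := new_lines.concat "```\n"
    let new_lines := new_lines.concat "\n"
    let new_lines := new_lines.concat table_markdown
    let new_lines := new_lines.concat "\n\n"
    let new_lines := new_lines.concat "```{=latex}\n"
    let new_lines := new_lines.concat "\\end{landscape}\n"
    let new_lines := new_lines.concat "```\n"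
    let new_lines := new_lines.concat "\n"
    new_lines ++ PySem.List.slice lines (some third_heading_index) none

-- ===== PORT B =====
-- the block of lines out.extend(...)ed just before the line that exhausts the countdown
def pvBlock (tm : String) : List String :=
  ["```{=latex}\n", "\\begin{landscape}\n", "```\n", "\n", tm,
   "\n\n", "```{=latex}\n", "\\end{landscape}\n", "```\n", "\n"]

-- the streaming loop: state (out, remaining)
def pvStep (tm : String) (st : List String × Nat) (line : String) : List String × Nat :=
  if st.2 ≠ 0 ∧ PySem.Str.startswith line "# " then
    let r' := st.2 - 1
    let out' := if r' = 0 then st.1 ++ pvBlock tm else st.1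
    (out'.concat line, r')
  else (st.1.concat line, st.2)

def insert_table_before_third_heading_alt (lines : List String) (table_markdown : String) : List String :=
  let st := lines.foldl (pvStep table_markdown) ([], 3)
  if st.2 ≠ 0 then []  -- raise ValueError — excluded by Pre_
  else st.1

-- ===== PRECONDITION & SPEC =====
-- Pre_ excludes exactly the inputs with fewer than three '# '-headed lines, where A raises ValueError.
def Pre_insert_table_before_third_heading (lines : List String) (table_markdown : String) : Prop :=
  3 ≤ lines.countP (fun l => PySem.Str.startswith l "# ")
instance (lines : List String) (table_markdown : String) : Decidable (Pre_insert_table_before_third_heading lines table_markdown) := by unfold Pre_insert_table_before_third_heading; infer_instance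

def pvWitness_insert_table_before_third_heading : List String × String :=
  (["# a", "x", "# b", "# c", "y"], "|t|")

def Spec_insert_table_before_third_heading (lines : List String) (table_markdown : String) (out : List String) : Prop := out = insert_table_before_third_heading_alt lines table_markdown
instance (lines : List String) (table_markdown : String) (out : List String) : Decidable (Spec_insert_table_before_third_heading lines table_markdown out) := by unfold Spec_insert_table_before_third_heading; infer_instance

-- ===== CLAIM (what is proved, stated in full; the proofs are below) =====
def Claim_equal_insert_table_before_third_heading : Prop := ∀ (lines : List String) (table_markdown : String), Dom_insert_table_before_third_heading lines table_markdown → Pre_insert_table_before_third_heading lines table_markdown → Spec_insert_table_before_third_heading lines table_markdown (insert_table_before_third_heading lines table_markdown)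

-- ===== LEMMAS AND PROOFS =====

-- index (0-based) of the r-th (1-based) '# '-heading, if any
def pvNth : List String → Nat → Option Nat
  | [], _ => none
  | l :: ls, r =>
    if PySem.Str.startswith l "# " then
      if r = 1 then some 0 else (pvNth ls (r - 1)).map (· + 1)
    else (pvNth ls r).map (· + 1)

-- recursive description of the streaming loop's output component
def pvGo (tm : String) : List String → Nat → List String
  | [], _ => []
  | l :: ls, r =>
    if r ≠ 0 ∧ PySem.Str.startswith l "# " then
      (if r - 1 = 0 then pvBlock tm else []) ++ l :: pvGo tm ls (r - 1)
    else l :: pvGo tm ls r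

theorem pvGo_zero (tm : String) (ls : List String) : pvGo tm ls 0 = ls := by
  induction ls with
  | nil => rfl
  | cons l ls ih => simp [pvGo, ih]

theorem pvFoldl_go (tm : String) (ls : List String) : ∀ (acc : List String) (r : Nat),
    ls.foldl (pvStep tm) (acc, r) =
      (acc ++ pvGo tm ls r, r - ls.countP (fun l => PySem.Str.startswith l "# ")) := by
  induction ls with
  | nil => intro acc r; simp [pvGo]
  | cons l ls ih =>
    intro acc r
    by_cases h : PySem.Chars.startswith l.toList ['#', ' '] = true
    · by_cases hr : r = 0
      · subst hr
        simp [pvStep, pvGo, h, ih, pvGo_zero, List.concat_eq_append]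
      · by_cases h1 : r - 1 = 0
        · simp [pvStep, pvGo, h, hr, h1, ih, List.concat_eq_append]
          omega
        · simp [pvStep, pvGo, h, hr, h1, ih, List.concat_eq_append]
          omega
    · simp [pvStep, pvGo, h, ih, List.concat_eq_append]

theorem pvGo_nth (tm : String) (ls : List String) : ∀ (r k : Nat), 1 ≤ r →
    pvNth ls r = some k →
    pvGo tm ls r = ls.take k ++ pvBlock tm ++ ls.drop k := by
  induction ls with
  | nil => intro r k _ h; simp [pvNth] at h
  | cons l ls ih =>
    intro r k hr h
    by_cases hl : PySem.Chars.startswith l.toList ['#', ' '] = true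
    · by_cases h1 : r = 1
      · subst h1
        simp [pvNth, hl] at h
        subst h
        simp [pvGo, hl, pvGo_zero]
      · simp [pvNth, hl, h1] at h
        obtain ⟨k', hk', rfl⟩ := h
        simp [pvGo, hl, ih (r - 1) k' (by omega) hk',
          show ¬(r - 1 = 0) by omega, show ¬(r = 0) by omega]
    · simp [pvNth, hl] at h
      obtain ⟨k', hk', rfl⟩ := h
      simp [pvGo, hl, ih r k' hr hk']

theorem pvCountP_eq (ls : List String) :
    ls.countP (fun l => PySem.Str.startswith l "# ")
      = ls.countP (fun l => PySem.Chars.startswith l.toList ['#', ' ']) := by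
  induction ls with
  | nil => rfl
  | cons l ls ih => rw [List.countP_cons, List.countP_cons, ih]; simp

theorem pvNth_some_of_count (ls : List String) : ∀ (r : Nat), 1 ≤ r →
    r ≤ ls.countP (fun l => PySem.Chars.startswith l.toList ['#', ' ']) →
    ∃ k, pvNth ls r = some k := by
  induction ls with
  | nil => intro r h1 h2; simp at h2; omega
  | cons l ls ih =>
    intro r h1 h2
    rw [List.countP_cons] at h2
    by_cases hl : PySem.Chars.startswith l.toList ['#', ' '] = true
    · by_cases hr : r = 1
      · exact ⟨0, by simp [pvNth, hl, hr]⟩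
      · obtain ⟨k, hk⟩ := ih (r - 1) (by omega) (by simp [hl] at h2; omega)
        exact ⟨k + 1, by simp [pvNth, hl, hr, hk]⟩
    · obtain ⟨k, hk⟩ := ih r h1 (by simp [hl] at h2; omega)
      exact ⟨k + 1, by simp [pvNth, hl, hk]⟩

-- A's comprehension, started at an arbitrary offset
def pvHeadsFrom (ls : List String) (s : Int) : List Int :=
  (PySem.List.enumerate ls s).filterMap
    (fun p => if PySem.Str.startswith p.2 "# " then some p.1 else none)

theorem pvHeadsFrom_cons (l : String) (ls : List String) (s : Int) :
    pvHeadsFrom (l :: ls) s =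
      if PySem.Str.startswith l "# " then s :: pvHeadsFrom ls (s + 1) else pvHeadsFrom ls (s + 1) := by
  by_cases h : PySem.Chars.startswith l.toList ['#', ' '] = true <;>
    simp [pvHeadsFrom, PySem.List.enumerate_cons, h]

theorem pvHeads_nth (ls : List String) : ∀ (r : Nat) (i : Nat),
    (pvHeadsFrom ls (i : Int))[r]? = (pvNth ls (r + 1)).map (fun k => ((i + k : Nat) : Int)) := by
  induction ls with
  | nil => intro r i; simp [pvHeadsFrom, pvNth, PySem.List.enumerate]
  | cons l ls ih =>
    intro r i
    rw [pvHeadsFrom_cons]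
    simp only [pvNth]
    have hcast : ((i : Int) + 1) = (((i + 1 : Nat)) : Int) := by push_cast; ring
    by_cases h : PySem.Str.startswith l "# " = true
    · rw [if_pos h, if_pos h]
      cases r with
      | zero => simp
      | succ r' =>
        rw [List.getElem?_cons_succ, hcast, ih r' (i + 1)]
        have : r' + 1 + 1 - 1 = r' + 1 := by omega
        rw [if_neg (by omega), this, Option.map_map]
        congr 1; funext k; simp; omega
    · rw [if_neg h, if_neg h, hcast, ih r (i + 1)]
      rw [Option.map_map]
      congr 1; funext k; simp; omega

-- ===== VERDICT (by name: the statement is the Claim_ definition above) =====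
theorem insert_table_before_third_heading_spec : Claim_equal_insert_table_before_third_heading := by
  intro lines tm _ hpre
  unfold Spec_insert_table_before_third_heading
  unfold insert_table_before_third_heading insert_table_before_third_heading_alt
  have hpre' : 3 ≤ lines.countP (fun l => PySem.Str.startswith l "# ") := hpre
  obtain ⟨k, hk⟩ := pvNth_some_of_count lines 3 (by omega) (by rw [← pvCountP_eq]; exact hpre')
  have hA : pvHeadingsA lines = pvHeadsFrom lines ((0 : Nat) : Int) := rfl
  have hheads := pvHeads_nth lines 2 0
  rw [hk] at hheads
  simp only [hA, hheads, Option.map_some, Nat.zero_add]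
  rw [pvFoldl_go]
  simp only [List.nil_append]
  rw [pvGo_nth tm lines 3 k (by omega) hk]
  have h2 : (3 : Nat) - lines.countP (fun l => PySem.Str.startswith l "# ") = 0 := by omega
  rw [h2]
  simp [PySem.List.slice_to_natCast, PySem.List.slice_from_natCast,
    List.concat_eq_append, pvBlock]
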